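-- pv_equiv track=rewrite | github.com/jaesoekjjanag/Algorithms | etc/String/로그파일정렬/로그파일정렬.py | logSort
-- ===== SOURCE A (Python) =====
-- def logSort(arr):
--   dig = []
--   let = []
--
--   for i in arr:
--     if 'dig' in i.split()[0]:
--       dig.append(i)
--     else:
--       let.append(i)
--
--   let.sort(key=lambda x: (x.split()[1:], x.split()[0]))
--   return let + dig
-- ===== SOURCE B (Python) =====
-- def logSort(arr):
--   def key(log):
--     t = log.split()
--     first = t[0]
--     if 'dig' in first:
--       return (1, [], '')
--     return (0, t[1:], first)
--   return sorted(arr, key=key)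
-- ===== Notes on version B (the rewrite author's own statement) =====
-- stated objective: idiomatic
-- what changed: Replaces the two-list partition plus separate in-place sort with a single stable sorted() call whose key ranks letter logs (0, rest-tokens, first-token) before digit logs (1, [], ''), relying on sort stability to keep digit logs in input order.
import Mathlib
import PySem

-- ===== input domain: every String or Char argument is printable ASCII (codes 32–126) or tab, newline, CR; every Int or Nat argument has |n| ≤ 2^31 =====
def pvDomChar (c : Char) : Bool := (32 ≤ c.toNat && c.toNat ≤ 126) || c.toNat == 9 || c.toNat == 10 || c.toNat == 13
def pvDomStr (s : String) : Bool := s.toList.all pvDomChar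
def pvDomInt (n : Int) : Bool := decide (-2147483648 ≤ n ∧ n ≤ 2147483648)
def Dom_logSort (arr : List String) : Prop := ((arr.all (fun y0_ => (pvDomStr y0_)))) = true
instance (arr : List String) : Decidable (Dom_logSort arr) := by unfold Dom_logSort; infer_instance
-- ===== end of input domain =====

-- B replaces A's two-list partition plus separate in-place sort by ONE stable sorted() call
-- with a rank-first key (letters: (0, rest, first); digits: (1, [], '')); same cost, more idiomatic.

-- ===== PORT A =====
-- 'dig' in i.split()[0]  (headD "" totalises the [0]-index; Pre_ excludes the IndexError inputs)
def pvIsDig (i : String) : Bool := PySem.Str.isIn "dig" ((PySem.Str.split₀ i).headD "")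
-- x.split()[1:]
def pvK1 (x : String) : List String := (PySem.Str.split₀ x).drop 1
-- x.split()[0]  (totalised; only called on strings with a nonempty split inside Pre_)
def pvK2 (x : String) : String := (PySem.Str.split₀ x).headD ""

def logSort (arr : List String) : List String :=
  -- the for-loop appending to dig / let, as a fold over the pair (dig, let)
  let st := arr.foldl
    (fun s i => if pvIsDig i then (s.1 ++ [i], s.2) else (s.1, s.2 ++ [i]))
    (([] : List String), ([] : List String))
  PySem.List.sorted2 st.2 pvK1 pvK2 ++ st.1

-- ===== PORT B =====
-- Source B's key(log) returns the tuple (1, [], '') for digit logs and (0, t[1:], t[0]) for letter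
-- logs; the Python 3-tuple key (flag, rest, first) is modelled as PySem's tuple-key sort
-- sorted2 with k1 = flag and k2 = the lexicographic pair (rest, first) — exact: Python's
-- tuple comparison is the same nested lexicographic order.
def pvFlag (log : String) : Nat :=
  if PySem.Str.isIn "dig" ((PySem.Str.split₀ log).headD "") then 1 else 0

def pvKey (log : String) : Lex (List String × String) :=
  let t := PySem.Str.split₀ log
  let first := t.headD ""          -- t[0], totalised; Pre_ excludes the IndexError inputs
  if PySem.Str.isIn "dig" first then toLex (([] : List String), "")
  else toLex (t.drop 1, first)

def logSort_alt (arr : List String) : List String :=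
  PySem.List.sorted2 arr pvFlag pvKey

-- ===== PRECONDITION & SPEC =====
-- Pre_ excludes exactly the inputs containing a string with no tokens (empty/whitespace-only),
-- on which both Pythons raise IndexError at split()[0].
def Pre_logSort (arr : List String) : Prop := ∀ s ∈ arr, PySem.Str.split₀ s ≠ []
instance (arr : List String) : Decidable (Pre_logSort arr) := by unfold Pre_logSort; infer_instance

def pvWitness_logSort : List String := ["dig1 8 1 5 1", "let1 art can", "let2 own kit dig"]

def Spec_logSort (arr : List String) (out : List String) : Prop := out = logSort_alt arr
instance (arr : List String) (out : List String) : Decidable (Spec_logSort arr out) := by unfold Spec_logSort; infer_instance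

-- ===== CLAIM (what is proved, stated in full; the proofs are below) =====
def Claim_equal_logSort : Prop := ∀ (arr : List String), Dom_logSort arr → Pre_logSort arr → Spec_logSort arr (logSort arr)

-- ===== LEMMAS AND PROOFS =====

-- B's comparison function, as PySem.List.sorted2 unfolds it
def pvB (a b : String) : Bool :=
  decide (pvFlag a < pvFlag b) || (!decide (pvFlag b < pvFlag a) && decide (pvKey a < pvKey b))
-- A's sorted2 comparison function on the letter logs
def pvLt2 (a b : String) : Bool :=
  decide (pvK1 a < pvK1 b) || (!decide (pvK1 b < pvK1 a) && decide (pvK2 a < pvK2 b))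

theorem pvKey_dig_not_before (x y : String) (hx : pvIsDig x = true) :
    pvB x y = false := by
  by_cases hy : pvIsDig y = true <;>
    simp_all [pvB, pvFlag, pvKey, pvIsDig, Prod.Lex.toLex_lt_toLex]

theorem pvKey_let_before_dig (x d : String) (hx : pvIsDig x = false) (hd : pvIsDig d = true) :
    pvB x d = true := by
  simp_all [pvB, pvFlag, pvIsDig]

theorem lex_lt_eq (k1a k1b : List String) (k2a k2b : String) :
    decide (toLex (k1a, k2a) < toLex (k1b, k2b))
      = (decide (k1a < k1b) || (!decide (k1b < k1a) && decide (k2a < k2b))) := by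
  rcases lt_trichotomy k1a k1b with h | h | h
  · simp [Prod.Lex.toLex_lt_toLex, h, lt_asymm h]
  · simp [Prod.Lex.toLex_lt_toLex, h]
  · simp [Prod.Lex.toLex_lt_toLex, h, lt_asymm h, h.ne']

theorem pvB_eq_lt2 (a b : String) (ha : pvIsDig a = false) (hb : pvIsDig b = false) :
    pvB a b = pvLt2 a b := by
  simp only [pvIsDig] at ha hb
  simp only [pvB, pvLt2, pvFlag, pvKey, pvK1, pvK2, ha, hb, Bool.false_eq_true, if_false]
  simp only [lt_irrefl, decide_false, Bool.false_or, Bool.not_false, Bool.true_and]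
  exact lex_lt_eq _ _ _ _

theorem insertBy_congr_mem {α : Type} (b1 b2 : α → α → Bool) (x : α) (ys : List α)
    (h : ∀ y ∈ ys, b1 x y = b2 x y) :
    PySem.List.insertBy b1 x ys = PySem.List.insertBy b2 x ys := by
  induction ys with
  | nil => rfl
  | cons y ys ih =>
    simp only [PySem.List.insertBy, h y (by simp)]
    split <;> simp_all

theorem insertBy_append_of_before {α : Type} (before : α → α → Bool) (x : α) (L D : List α)
    (h : ∀ d ∈ D, before x d = true) :
    PySem.List.insertBy before x (L ++ D) = PySem.List.insertBy before x L ++ D := by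
  induction L with
  | nil =>
    cases D with
    | nil => rfl
    | cons d D' => simp [PySem.List.insertBy, h d (by simp)]
  | cons y L' ih =>
    simp only [List.cons_append, PySem.List.insertBy]
    split <;> simp [ih]

-- the single stable insertion-sort pass keeps digit logs at the tail in arrival order
theorem fold_split (xs : List String) (L D : List String)
    (hD : ∀ d ∈ D, pvIsDig d = true) (hL : ∀ y ∈ L, pvIsDig y = false) :
    xs.foldl (fun acc x => PySem.List.insertBy pvB x acc) (L ++ D)
      = (xs.filter (fun x => !pvIsDig x)).foldl (fun acc x => PySem.List.insertBy pvB x acc) L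
          ++ D ++ xs.filter pvIsDig := by
  induction xs generalizing L D with
  | nil => simp
  | cons x xs ih =>
    by_cases hx : pvIsDig x = true
    · have h1 : PySem.List.insertBy pvB x (L ++ D) = (L ++ D) ++ [x] :=
        PySem.List.insertBy_of_forall_not_before _ _ _
          (fun y _ => pvKey_dig_not_before x y hx)
      have h2 := ih L (D ++ [x])
        (by intro d hd; rcases List.mem_append.1 hd with h | h
            · exact hD d h
            · simp at h; exact h ▸ hx) hL
      simp only [List.foldl_cons, h1, List.append_assoc] at h2 ⊢
      rw [h2]
      simp [hx]
    · have hx' : pvIsDig x = false := by simpa using hx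
      have h1 : PySem.List.insertBy pvB x (L ++ D) = PySem.List.insertBy pvB x L ++ D :=
        insertBy_append_of_before _ _ _ _
          (fun d hd => pvKey_let_before_dig x d hx' (hD d hd))
      have h2 := ih (PySem.List.insertBy pvB x L) D hD
        (by intro y hy; rcases (PySem.List.mem_insertBy pvB x y L).1 hy with h | h
            · exact h ▸ hx'
            · exact hL y h)
      simp only [List.foldl_cons, h1]
      rw [h2]
      simp [hx']

-- on letter logs B's key compares exactly as A's sorted2 key, so the folds agree
theorem fold_letters (xs : List String) (L : List String)
    (hxs : ∀ y ∈ xs, pvIsDig y = false) (hL : ∀ y ∈ L, pvIsDig y = false) :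
    xs.foldl (fun acc x => PySem.List.insertBy pvB x acc) L
      = xs.foldl (fun acc x => PySem.List.insertBy pvLt2 x acc) L := by
  induction xs generalizing L with
  | nil => rfl
  | cons x xs ih =>
    have hx : pvIsDig x = false := hxs x (by simp)
    have hcong : PySem.List.insertBy pvB x L = PySem.List.insertBy pvLt2 x L :=
      insertBy_congr_mem _ _ _ _ (fun y hy => pvB_eq_lt2 x y hx (hL y hy))
    simp only [List.foldl_cons, hcong]
    exact ih (PySem.List.insertBy pvLt2 x L) (fun y hy => hxs y (by simp [hy]))
      (by intro y hy; rcases (PySem.List.mem_insertBy pvLt2 x y L).1 hy with h | h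
          · exact h ▸ hx
          · exact hL y h)

-- A's partition loop computed: the two accumulated lists are the two filters
theorem partition_fold (xs : List String) (d l : List String) :
    xs.foldl (fun s i => if pvIsDig i then (s.1 ++ [i], s.2) else (s.1, s.2 ++ [i])) (d, l)
      = (d ++ xs.filter pvIsDig, l ++ xs.filter (fun x => !pvIsDig x)) := by
  induction xs generalizing d l with
  | nil => simp
  | cons x xs ih =>
    by_cases hx : pvIsDig x = true <;> simp [hx, ih]

-- ===== VERDICT (by name: the statement is the Claim_ definition above) =====
theorem logSort_spec : Claim_equal_logSort := by
  intro arr _ _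
  unfold Spec_logSort logSort logSort_alt
  rw [partition_fold]
  have hsB : PySem.List.sorted2 arr pvFlag pvKey
      = arr.foldl (fun acc x => PySem.List.insertBy pvB x acc) [] := rfl
  rw [hsB]
  have h := fold_split arr [] [] (by simp) (by simp)
  simp only [List.append_nil] at h
  rw [h]
  have hlet := fold_letters (arr.filter (fun x => !pvIsDig x)) []
    (by intro y hy; simpa using (List.mem_filter.1 hy).2) (by simp)
  rw [hlet]
  have hs2 : PySem.List.sorted2 (arr.filter (fun x => !pvIsDig x)) pvK1 pvK2
      = (arr.filter (fun x => !pvIsDig x)).foldl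
          (fun acc x => PySem.List.insertBy pvLt2 x acc) [] := rfl
  simp only [List.nil_append]
  rw [hs2]
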